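-- pv_equiv track=rewrite | github.com/peterpei666/leetcode_python | 3844. Longest Almost-Palindromic Substring.py | almostPalindromic
-- ===== SOURCE A (Python) =====
-- def almostPalindromic(s: str) -> int:
--     n = len(s)
--     dp = [[-1] * (n + 1) for _ in range(n + 1)]
--
--     def find(l: int, r: int) -> int:
--         if l >= r:
--             return 0
--         if dp[l][r] != -1:
--             return dp[l][r]
--         if s[l] == s[r]:
--             dp[l][r] = find(l + 1, r - 1)
--         else:
--             dp[l][r] = 1 + min(find(l + 1, r), find(l, r - 1))
--         return dp[l][r]
--
--     ans = 1
--     for i in range(n):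
--         for j in range(i + ans, n):
--             if find(i, j) <= 1:
--                 ans = j - i + 1
--     return ans
-- ===== SOURCE B (Python) =====
-- def almostPalindromic(s: str) -> int:
--     n = len(s)
--     # dp maps (i, j) to the minimum number of deletions that make s[i..j] a palindrome;
--     # intervals of length < 2 cost 0 and are left implicit (default 0).
--     dp = {}
--     for length in range(2, n + 1):
--         for i in range(0, n - length + 1):
--             j = i + length - 1
--             if s[i] == s[j]:
--                 dp[(i, j)] = dp.get((i + 1, j - 1), 0)
--             else:
--                 dp[(i, j)] = 1 + min(dp.get((i + 1, j), 0), dp.get((i, j - 1), 0))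
--     ans = 1
--     for i in range(n):
--         for j in range(i + 1, n):
--             if dp.get((i, j), 0) <= 1:
--                 ans = max(ans, j - i + 1)
--     return ans
-- ===== Notes on version B (the rewrite author's own statement) =====
-- stated objective: alternative
-- what changed: A computes palindrome-deletion cost by memoized top-down recursion and scans pairs with an overwriting answer whose inner loop starts at i+ans; B fills the cost table bottom-up by increasing interval length into a dict and takes a running max over all pairs i<j.
import Mathlib
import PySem

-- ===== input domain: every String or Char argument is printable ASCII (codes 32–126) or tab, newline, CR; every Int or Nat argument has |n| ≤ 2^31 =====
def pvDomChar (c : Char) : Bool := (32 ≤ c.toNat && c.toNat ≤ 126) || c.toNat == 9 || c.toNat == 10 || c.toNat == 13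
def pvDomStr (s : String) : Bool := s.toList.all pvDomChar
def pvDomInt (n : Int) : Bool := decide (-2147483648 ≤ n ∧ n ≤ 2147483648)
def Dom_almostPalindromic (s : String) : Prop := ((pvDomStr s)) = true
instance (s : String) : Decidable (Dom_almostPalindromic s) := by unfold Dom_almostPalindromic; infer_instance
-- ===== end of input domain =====

-- B replaces A's memoized top-down recursion by a bottom-up interval-length DP table and a
-- max-scan of all pairs; same asymptotic cost (alternative decomposition, not claimed faster).

-- ===== PORT A =====
-- A's inner `find(l, r)` with its dp memo matrix threaded through as state: the matrix of -1
-- sentinels is modelled by the total lookup function (Int × Int) → Int, initially constantly -1,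
-- updated pointwise exactly where A assigns dp[l][r]; the recursion is made structural on the
-- fuel (r - l).toNat, which bounds A's recursion depth, so no branch is ever cut short.
def pvFindM (cs : List Char) : Nat → ((Int × Int) → Int) → Int → Int → Int × ((Int × Int) → Int)
  | 0, m, _, _ => (0, m)
  | fuel + 1, m, l, r =>
    if l ≥ r then (0, m)
    else if m (l, r) ≠ -1 then (m (l, r), m)
    else if PySem.List.pyGet? cs l = PySem.List.pyGet? cs r then
      let p := pvFindM cs fuel m (l + 1) (r - 1)
      (p.1, fun q => if q = (l, r) then p.1 else p.2 q)
    else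
      let p1 := pvFindM cs fuel m (l + 1) r
      let p2 := pvFindM cs fuel p1.2 l (r - 1)
      let v := 1 + min p1.1 p2.1
      (v, fun q => if q = (l, r) then v else p2.2 q)

def almostPalindromic (s : String) : Int :=
  let cs := s.toList
  let n : Int := cs.length
  ((PySem.List.pyRange 0 n 1).foldl (fun st i =>
    (PySem.List.pyRange (i + st.1) n 1).foldl (fun st j =>
      let f := pvFindM cs (j - i).toNat st.2 i j
      (if f.1 ≤ 1 then j - i + 1 else st.1, f.2)) st) ((1 : Int), (fun _ => (-1 : Int)))).1

-- ===== PORT B =====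
-- Source B's dp dict {(i,j): cost} with reads dp.get(p, 0), as PySem.Dict.
def almostPalindromic_alt (s : String) : Int :=
  let cs := s.toList
  let n : Int := cs.length
  let dp : PySem.Dict (Int × Int) Int :=
    (PySem.List.pyRange 2 (n + 1) 1).foldl (fun dp len =>
      (PySem.List.pyRange 0 (n - len + 1) 1).foldl (fun dp i =>
        let j := i + len - 1
        if PySem.List.pyGet? cs i = PySem.List.pyGet? cs j then
          dp.insert (i, j) (dp.getD (i + 1, j - 1) 0)
        else
          dp.insert (i, j) (1 + min (dp.getD (i + 1, j) 0) (dp.getD (i, j - 1) 0))) dp)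
      PySem.Dict.empty
  (PySem.List.pyRange 0 n 1).foldl (fun ans i =>
    (PySem.List.pyRange (i + 1) n 1).foldl (fun a j =>
      if dp.getD (i, j) 0 ≤ 1 then max a (j - i + 1) else a) ans) 1

-- ===== PRECONDITION & SPEC =====
def Spec_almostPalindromic (s : String) (out : Int) : Prop := out = almostPalindromic_alt s
instance (s : String) (out : Int) : Decidable (Spec_almostPalindromic s out) := by unfold Spec_almostPalindromic; infer_instance

-- ===== CLAIM (what is proved, stated in full; the proofs are below) =====
def Claim_equal_almostPalindromic : Prop := ∀ (s : String), Dom_almostPalindromic s → Spec_almostPalindromic s (almostPalindromic s)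

-- ===== LEMMAS AND PROOFS =====

-- proof-side pure version of A's find (the value the memo matrix caches), same recurrence,
-- structural on the fuel (r - l).toNat
def pvFindAux (cs : List Char) : Nat → Int → Int → Int
  | 0, _, _ => 0
  | fuel + 1, l, r =>
    if l ≥ r then 0
    else if PySem.List.pyGet? cs l = PySem.List.pyGet? cs r then pvFindAux cs fuel (l + 1) (r - 1)
    else 1 + min (pvFindAux cs fuel (l + 1) r) (pvFindAux cs fuel l (r - 1))

def pvFind (cs : List Char) (l r : Int) : Int := pvFindAux cs (r - l).toNat l r

-- `Inv cs L dp`: the table holds the true deletion cost for every interval [i, j] of length ≤ L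
-- (equivalently j - i < L) with 0 ≤ i and j inside the string.
def pvInv (cs : List Char) (L : Int) (dp : PySem.Dict (Int × Int) Int) : Prop :=
  ∀ i j : Int, 0 ≤ i → j < (cs.length : Int) → j - i < L → dp.getD (i, j) 0 = pvFind cs i j

theorem pvFindAux_irrel (cs : List Char) : ∀ (f1 f2 : Nat) (l r : Int),
    (r - l).toNat ≤ f1 → (r - l).toNat ≤ f2 → pvFindAux cs f1 l r = pvFindAux cs f2 l r := by
  intro f1
  induction f1 with
  | zero =>
    intro f2 l r h1 _
    cases f2 with
    | zero => rfl
    | succ f2 => simp only [pvFindAux]; rw [if_pos (by omega : l ≥ r)]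
  | succ f1 ih =>
    intro f2 l r h1 h2
    cases f2 with
    | zero => simp only [pvFindAux]; rw [if_pos (by omega : l ≥ r)]
    | succ f2 =>
      simp only [pvFindAux]
      by_cases hlr : l ≥ r
      · rw [if_pos hlr, if_pos hlr]
      · rw [if_neg hlr, if_neg hlr]
        by_cases hc : PySem.List.pyGet? cs l = PySem.List.pyGet? cs r
        · rw [if_pos hc, if_pos hc]
          exact ih f2 (l + 1) (r - 1) (by omega) (by omega)
        · rw [if_neg hc, if_neg hc,
            ih f2 (l + 1) r (by omega) (by omega), ih f2 l (r - 1) (by omega) (by omega)]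

-- the recurrence A's find satisfies, fuel eliminated
theorem pvFind_eq (cs : List Char) (l r : Int) :
    pvFind cs l r = if l ≥ r then 0
      else if PySem.List.pyGet? cs l = PySem.List.pyGet? cs r then pvFind cs (l + 1) (r - 1)
      else 1 + min (pvFind cs (l + 1) r) (pvFind cs l (r - 1)) := by
  unfold pvFind
  by_cases hlr : l ≥ r
  · rw [show (r - l).toNat = 0 from by omega]
    simp only [pvFindAux]
    rw [if_pos hlr]
  · obtain ⟨k, hk⟩ : ∃ k, (r - l).toNat = k + 1 := ⟨(r - l).toNat - 1, by omega⟩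
    rw [hk]
    simp only [pvFindAux]
    rw [if_neg hlr, if_neg hlr]
    by_cases hc : PySem.List.pyGet? cs l = PySem.List.pyGet? cs r
    · rw [if_pos hc, if_pos hc]
      exact pvFindAux_irrel cs k ((r - 1 - (l + 1)).toNat) (l + 1) (r - 1) (by omega) (by omega)
    · rw [if_neg hc, if_neg hc,
        pvFindAux_irrel cs k ((r - (l + 1)).toNat) (l + 1) r (by omega) (by omega),
        pvFindAux_irrel cs k ((r - 1 - l).toNat) l (r - 1) (by omega) (by omega)]

theorem pvFind_base (cs : List Char) (l r : Int) (h : r ≤ l) : pvFind cs l r = 0 := by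
  rw [pvFind_eq]; simp [show l ≥ r from h]

-- a memo state is good when every cached entry holds the pure find value
def pvGood (cs : List Char) (m : (Int × Int) → Int) : Prop :=
  ∀ p : Int × Int, m p ≠ -1 → m p = pvFind cs p.1 p.2

-- pointwise memo update with the correct value keeps the memo good
theorem pvGood_update (cs : List Char) (m : (Int × Int) → Int) (hg : pvGood cs m)
    (l r v : Int) (hv : v = pvFind cs l r) :
    pvGood cs (fun q => if q = (l, r) then v else m q) := by
  intro q hq
  have hq' : (if q = (l, r) then v else m q) ≠ -1 := hq
  by_cases hql : q = (l, r)
  · show (if q = (l, r) then v else m q) = _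
    rw [if_pos hql, hv, hql]
  · show (if q = (l, r) then v else m q) = _
    rw [if_neg hql] at hq' ⊢
    exact hg q hq'

-- the memoized find returns the pure find value and keeps the memo good
theorem pvFindM_spec (cs : List Char) : ∀ (fuel : Nat) (m : (Int × Int) → Int) (l r : Int),
    (r - l).toNat ≤ fuel → pvGood cs m →
    (pvFindM cs fuel m l r).1 = pvFind cs l r ∧ pvGood cs (pvFindM cs fuel m l r).2 := by
  intro fuel
  induction fuel with
  | zero =>
    intro m l r h hg
    exact ⟨(pvFind_base cs l r (by omega)).symm, hg⟩
  | succ fuel ih =>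
    intro m l r h hg
    simp only [pvFindM]
    by_cases hlr : l ≥ r
    · rw [if_pos hlr]
      exact ⟨(pvFind_base cs l r hlr).symm, hg⟩
    · rw [if_neg hlr]
      by_cases hm : m (l, r) ≠ -1
      · rw [if_pos hm]
        exact ⟨hg (l, r) hm, hg⟩
      · rw [if_neg hm]
        by_cases hc : PySem.List.pyGet? cs l = PySem.List.pyGet? cs r
        · rw [if_pos hc]
          obtain ⟨h1, h2⟩ := ih m (l + 1) (r - 1) (by omega) hg
          have hval : (pvFindM cs fuel m (l + 1) (r - 1)).1 = pvFind cs l r := by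
            rw [h1, pvFind_eq cs l r, if_neg hlr, if_pos hc]
          exact ⟨hval, pvGood_update cs _ h2 l r _ hval⟩
        · rw [if_neg hc]
          obtain ⟨h1, h2⟩ := ih m (l + 1) r (by omega) hg
          obtain ⟨h3, h4⟩ := ih (pvFindM cs fuel m (l + 1) r).2 l (r - 1) (by omega) h2
          have hval : 1 + min (pvFindM cs fuel m (l + 1) r).1
              (pvFindM cs fuel (pvFindM cs fuel m (l + 1) r).2 l (r - 1)).1 = pvFind cs l r := by
            rw [h1, h3, pvFind_eq cs l r, if_neg hlr, if_neg hc]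
          exact ⟨hval, pvGood_update cs _ h4 l r _ hval⟩

-- A's inner scan loop with the memo threaded: its answer component is the pure inner scan
theorem pvInnerPair (cs : List Char) (i : Int) :
    ∀ (lj : List Int) (st : Int × ((Int × Int) → Int)), pvGood cs st.2 →
      ((lj.foldl (fun st j =>
          let f := pvFindM cs (j - i).toNat st.2 i j
          (if f.1 ≤ 1 then j - i + 1 else st.1, f.2)) st).1
        = lj.foldl (fun a j => if pvFind cs i j ≤ 1 then j - i + 1 else a) st.1)
      ∧ pvGood cs ((lj.foldl (fun st j =>
          let f := pvFindM cs (j - i).toNat st.2 i j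
          (if f.1 ≤ 1 then j - i + 1 else st.1, f.2)) st).2) := by
  intro lj
  induction lj with
  | nil => exact fun st hg => ⟨rfl, hg⟩
  | cons j t iht =>
    intro st hg
    simp only [List.foldl_cons]
    obtain ⟨h1, h2⟩ := pvFindM_spec cs ((j - i).toNat) st.2 i j le_rfl hg
    rw [h1]
    exact iht _ h2

-- the whole memo-threaded scan: its answer component is the pure nested scan
theorem pvOuterPair (cs : List Char) (n : Int) :
    ∀ (li : List Int) (st : Int × ((Int × Int) → Int)), pvGood cs st.2 →
      ((li.foldl (fun st i =>
          (PySem.List.pyRange (i + st.1) n 1).foldl (fun st j =>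
            let f := pvFindM cs (j - i).toNat st.2 i j
            (if f.1 ≤ 1 then j - i + 1 else st.1, f.2)) st) st).1
        = li.foldl (fun ans i =>
          (PySem.List.pyRange (i + ans) n 1).foldl
            (fun a j => if pvFind cs i j ≤ 1 then j - i + 1 else a) ans) st.1) := by
  intro li
  induction li with
  | nil => exact fun st _ => rfl
  | cons i t iht =>
    intro st hg
    simp only [List.foldl_cons]
    obtain ⟨h1, h2⟩ := pvInnerPair cs i (PySem.List.pyRange (i + st.1) n 1) st hg
    rw [iht _ h2, h1]

theorem pvInv_mono (cs : List Char) {L L' : Int} (h : L' ≤ L) {dp : PySem.Dict (Int × Int) Int}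
    (hInv : pvInv cs L dp) : pvInv cs L' dp :=
  fun i j hi hj hlt => hInv i j hi hj (by omega)

-- B's inner write loop for one interval length: it preserves the invariant for shorter
-- intervals, writes the true cost at every processed (i, i+len-1), and touches nothing else.
theorem pvInner (cs : List Char) (len : Int) (hlen : 2 ≤ len) :
    ∀ (li : List Int) (dp : PySem.Dict (Int × Int) Int), li.Nodup →
      (∀ i ∈ li, 0 ≤ i ∧ i + len ≤ (cs.length : Int)) →
      pvInv cs (len - 1) dp →
      pvInv cs (len - 1)
          (li.foldl (fun dp i =>
            let j := i + len - 1
            if PySem.List.pyGet? cs i = PySem.List.pyGet? cs j then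
              dp.insert (i, j) (dp.getD (i + 1, j - 1) 0)
            else
              dp.insert (i, j) (1 + min (dp.getD (i + 1, j) 0) (dp.getD (i, j - 1) 0))) dp) ∧
        (∀ i ∈ li,
          (li.foldl (fun dp i =>
            let j := i + len - 1
            if PySem.List.pyGet? cs i = PySem.List.pyGet? cs j then
              dp.insert (i, j) (dp.getD (i + 1, j - 1) 0)
            else
              dp.insert (i, j) (1 + min (dp.getD (i + 1, j) 0) (dp.getD (i, j - 1) 0))) dp).getD
            (i, i + len - 1) 0 = pvFind cs i (i + len - 1)) ∧
        (∀ p : Int × Int, (∀ i ∈ li, p ≠ (i, i + len - 1)) →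
          (li.foldl (fun dp i =>
            let j := i + len - 1
            if PySem.List.pyGet? cs i = PySem.List.pyGet? cs j then
              dp.insert (i, j) (dp.getD (i + 1, j - 1) 0)
            else
              dp.insert (i, j) (1 + min (dp.getD (i + 1, j) 0) (dp.getD (i, j - 1) 0))) dp).getD p 0
            = dp.getD p 0) := by
  intro li
  induction li with
  | nil => exact fun dp _ _ hInv => ⟨hInv, by simp, by simp⟩
  | cons i0 t ih =>
    intro dp hnd hb hInv
    simp only [List.foldl_cons]
    rcases List.nodup_cons.mp hnd with ⟨hi0t, hndt⟩
    rcases hb i0 (by simp) with ⟨hi0, hi0n⟩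
    set j0 : Int := i0 + len - 1 with hj0
    have hstep : (if PySem.List.pyGet? cs i0 = PySem.List.pyGet? cs j0 then
          dp.insert (i0, j0) (dp.getD (i0 + 1, j0 - 1) 0)
        else
          dp.insert (i0, j0) (1 + min (dp.getD (i0 + 1, j0) 0) (dp.getD (i0, j0 - 1) 0)))
        = dp.insert (i0, j0) (pvFind cs i0 j0) := by
      rw [pvFind_eq cs i0 j0, if_neg (by omega : ¬ i0 ≥ j0)]
      by_cases hc : PySem.List.pyGet? cs i0 = PySem.List.pyGet? cs j0
      · rw [if_pos hc, if_pos hc, hInv (i0 + 1) (j0 - 1) (by omega) (by omega) (by omega)]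
      · rw [if_neg hc, if_neg hc, hInv (i0 + 1) j0 (by omega) (by omega) (by omega),
          hInv i0 (j0 - 1) (by omega) (by omega) (by omega)]
    rw [hstep]
    have hInv1 : pvInv cs (len - 1) (dp.insert (i0, j0) (pvFind cs i0 j0)) := by
      intro a b ha hbn hab
      rw [PySem.Dict.getD_insert, if_neg (by intro h; rw [Prod.mk.injEq] at h; omega)]
      exact hInv a b ha hbn hab
    rcases ih (dp.insert (i0, j0) (pvFind cs i0 j0)) hndt (fun i hi => hb i (by simp [hi])) hInv1
      with ⟨h1, h2, h3⟩
    refine ⟨h1, ?_, ?_⟩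
    · intro i hi
      rcases List.mem_cons.mp hi with heq | hi'
      · rw [heq, h3 (i0, i0 + len - 1) (fun i' hi' heqp => by
          rw [Prod.mk.injEq] at heqp
          exact hi0t (heqp.1 ▸ hi')), ← hj0, PySem.Dict.getD_insert, if_pos rfl, hj0]
      · exact h2 i hi'
    · intro p hp
      rw [h3 p (fun i hi => hp i (by simp [hi])),
        PySem.Dict.getD_insert, if_neg (hj0 ▸ hp i0 (by simp))]

-- B's outer length loop: starting from lengths < L0 correct, it makes the whole table correct.
theorem pvOuter (cs : List Char) :
    ∀ (L0 : Int), 2 ≤ L0 → ∀ (dp : PySem.Dict (Int × Int) Int), pvInv cs (L0 - 1) dp →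
      pvInv cs (cs.length : Int)
        ((PySem.List.pyRange L0 ((cs.length : Int) + 1) 1).foldl (fun dp len =>
          (PySem.List.pyRange 0 ((cs.length : Int) - len + 1) 1).foldl (fun dp i =>
            let j := i + len - 1
            if PySem.List.pyGet? cs i = PySem.List.pyGet? cs j then
              dp.insert (i, j) (dp.getD (i + 1, j - 1) 0)
            else
              dp.insert (i, j) (1 + min (dp.getD (i + 1, j) 0) (dp.getD (i, j - 1) 0))) dp) dp) := by
  suffices h : ∀ (k : Nat) (L0 : Int), (((cs.length : Int) + 1 - L0).toNat = k) → 2 ≤ L0 →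
      ∀ (dp : PySem.Dict (Int × Int) Int), pvInv cs (L0 - 1) dp →
      pvInv cs (cs.length : Int)
        ((PySem.List.pyRange L0 ((cs.length : Int) + 1) 1).foldl (fun dp len =>
          (PySem.List.pyRange 0 ((cs.length : Int) - len + 1) 1).foldl (fun dp i =>
            let j := i + len - 1
            if PySem.List.pyGet? cs i = PySem.List.pyGet? cs j then
              dp.insert (i, j) (dp.getD (i + 1, j - 1) 0)
            else
              dp.insert (i, j) (1 + min (dp.getD (i + 1, j) 0) (dp.getD (i, j - 1) 0))) dp) dp) by
    intro L0 h2 dp hInv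
    exact h _ L0 rfl h2 dp hInv
  intro k
  induction k using Nat.strong_induction_on with
  | _ k ih =>
    intro L0 hk h2 dp hInv
    by_cases hle : (cs.length : Int) + 1 ≤ L0
    · rw [PySem.List.pyRange_one_eq_nil hle]
      exact pvInv_mono cs (by omega) hInv
    · push Not at hle
      rw [PySem.List.pyRange_one_cons (by omega : L0 < (cs.length : Int) + 1)]
      simp only [List.foldl_cons]
      have hinner := pvInner cs L0 h2 (PySem.List.pyRange 0 ((cs.length : Int) - L0 + 1) 1) dp
        (PySem.List.nodup_pyRange_one _ _)
        (fun i hi => by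
          rw [PySem.List.mem_pyRange_one] at hi
          exact ⟨hi.1, by omega⟩)
        hInv
      have hInvL0 : pvInv cs L0
          ((PySem.List.pyRange 0 ((cs.length : Int) - L0 + 1) 1).foldl (fun dp i =>
            let j := i + L0 - 1
            if PySem.List.pyGet? cs i = PySem.List.pyGet? cs j then
              dp.insert (i, j) (dp.getD (i + 1, j - 1) 0)
            else
              dp.insert (i, j) (1 + min (dp.getD (i + 1, j) 0) (dp.getD (i, j - 1) 0))) dp) := by
        intro a b ha hb hab
        by_cases hsm : b - a < L0 - 1
        · exact hinner.1 a b ha hb hsm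
        · have hbeq : b = a + L0 - 1 := by omega
          have hmem : a ∈ PySem.List.pyRange 0 ((cs.length : Int) - L0 + 1) 1 := by
            rw [PySem.List.mem_pyRange_one]; omega
          rw [hbeq]
          exact hinner.2.1 a hmem
      refine ih (((cs.length : Int) + 1 - (L0 + 1)).toNat) (by omega) (L0 + 1) rfl (by omega) _ ?_
      rw [show L0 + 1 - 1 = L0 from by ring]
      exact hInvL0

-- A's overwrite-scan equals the max-scan on an increasing list whose candidates all dominate
-- the entry accumulator.
theorem pvScanMaxEq (c : Int → Prop) [DecidablePred c] (i : Int) :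
    ∀ (lj : List Int) (a : Int), lj.Pairwise (· < ·) → (∀ j ∈ lj, a ≤ j - i + 1) →
      lj.foldl (fun a j => if c j then j - i + 1 else a) a
        = lj.foldl (fun a j => if c j then max a (j - i + 1) else a) a := by
  intro lj
  induction lj with
  | nil => intro a _ _; rfl
  | cons j0 t ih =>
    intro a hp hle
    simp only [List.foldl_cons]
    have hj0 : a ≤ j0 - i + 1 := hle j0 (by simp)
    rcases List.pairwise_cons.mp hp with ⟨hhd, htl⟩
    by_cases hc : c j0
    · simp only [if_pos hc, max_eq_right hj0]
      exact ih (j0 - i + 1) htl (fun j hj => by have := hhd j hj; omega)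
    · simp only [if_neg hc]
      exact ih a htl (fun j hj => hle j (by simp [hj]))

theorem pvScanNoop (c : Int → Prop) [DecidablePred c] (i : Int) :
    ∀ (lj : List Int) (a : Int), (∀ j ∈ lj, j - i + 1 ≤ a) →
      lj.foldl (fun a j => if c j then max a (j - i + 1) else a) a = a := by
  intro lj
  induction lj with
  | nil => intro a _; rfl
  | cons j0 t ih =>
    intro a hle
    simp only [List.foldl_cons]
    have h0 : max a (j0 - i + 1) = a := max_eq_left (hle j0 (by simp))
    by_cases hc : c j0
    · simp only [if_pos hc, h0]; exact ih a (fun j hj => hle j (by simp [hj]))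
    · simp only [if_neg hc]; exact ih a (fun j hj => hle j (by simp [hj]))

theorem pvScanMono (c : Int → Prop) [DecidablePred c] (i : Int) :
    ∀ (lj : List Int) (a : Int), a ≤ lj.foldl (fun a j => if c j then max a (j - i + 1) else a) a := by
  intro lj
  induction lj with
  | nil => intro a; simp
  | cons j0 t ih =>
    intro a
    simp only [List.foldl_cons]
    by_cases hc : c j0
    · simp only [if_pos hc]; exact le_trans (le_max_left _ _) (ih _)
    · simp only [if_neg hc]; exact ih a

-- A's outer scan (overwrite, lower bound i + ans) equals B's outer scan (running max from i + 1).
theorem pvScanOuter (c : Int → Int → Prop) [inst : ∀ i j, Decidable (c i j)] (n : Int) :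
    ∀ (li : List Int) (a : Int), 1 ≤ a →
      li.foldl (fun ans i => (PySem.List.pyRange (i + ans) n 1).foldl
          (fun a j => if c i j then j - i + 1 else a) ans) a
        = li.foldl (fun ans i => (PySem.List.pyRange (i + 1) n 1).foldl
          (fun a j => if c i j then max a (j - i + 1) else a) ans) a := by
  intro li
  induction li with
  | nil => intro a _; rfl
  | cons i t ih =>
    intro a ha
    simp only [List.foldl_cons]
    have hstep : (PySem.List.pyRange (i + a) n 1).foldl
        (fun a j => if c i j then j - i + 1 else a) a
        = (PySem.List.pyRange (i + 1) n 1).foldl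
        (fun a j => if c i j then max a (j - i + 1) else a) a := by
      rw [pvScanMaxEq (c i) i (PySem.List.pyRange (i + a) n 1) a
        (PySem.List.pairwise_lt_pyRange_one _ _)
        (fun j hj => by rw [PySem.List.mem_pyRange_one] at hj; omega)]
      by_cases h : i + a ≤ n
      · rw [PySem.List.pyRange_one_append (i + 1) (i + a) n (by omega) h, List.foldl_append,
          pvScanNoop (c i) i (PySem.List.pyRange (i + 1) (i + a) 1) a
            (fun j hj => by rw [PySem.List.mem_pyRange_one] at hj; omega)]
      · rw [PySem.List.pyRange_one_eq_nil (show n ≤ i + a by omega), List.foldl_nil,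
          pvScanNoop (c i) i (PySem.List.pyRange (i + 1) n 1) a
            (fun j hj => by rw [PySem.List.mem_pyRange_one] at hj; omega)]
    rw [hstep]
    exact ih _ (le_trans ha (pvScanMono (c i) i _ _))

-- ===== VERDICT (by name: the statement is the Claim_ definition above) =====
theorem almostPalindromic_spec : Claim_equal_almostPalindromic := by
  unfold Claim_equal_almostPalindromic Spec_almostPalindromic
  intro s _
  unfold almostPalindromic almostPalindromic_alt
  dsimp only
  set cs : List Char := s.toList with hcs
  set n : Int := (cs.length : Int) with hn
  -- the finished bottom-up table agrees with A's find on every scanned pair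
  have hInv0 : pvInv cs (2 - 1) PySem.Dict.empty := by
    intro i j _ _ hij
    rw [PySem.Dict.getD_empty]
    exact (pvFind_base cs i j (by omega)).symm
  have htbl := pvOuter cs 2 (by norm_num) PySem.Dict.empty hInv0
  -- the same table correctness, with the let-bindings of the port zeta-reduced
  have htbl' : pvInv cs n
      ((PySem.List.pyRange 2 (n + 1) 1).foldl (fun dp len =>
        (PySem.List.pyRange 0 (n - len + 1) 1).foldl (fun dp i =>
          if PySem.List.pyGet? cs i = PySem.List.pyGet? cs (i + len - 1) then
            dp.insert (i, i + len - 1) (dp.getD (i + 1, i + len - 1 - 1) 0)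
          else
            dp.insert (i, i + len - 1)
              (1 + min (dp.getD (i + 1, i + len - 1) 0) (dp.getD (i, i + len - 1 - 1) 0))) dp)
        PySem.Dict.empty) := htbl
  -- drop the threaded memo: A's scan equals the pure pvFind scan
  rw [pvOuterPair cs n (PySem.List.pyRange 0 n 1) (1, fun _ => -1) (fun _ hp => absurd rfl hp)]
  -- A's scan = pvFind max-scan = B's table max-scan
  refine Eq.trans
    (pvScanOuter (fun i j => pvFind cs i j ≤ 1) n (PySem.List.pyRange 0 n 1) 1 (by norm_num))
    (PySem.List.foldl_congr_mem _ _ _ _ ?_).symm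
  intro acc i hi
  rw [PySem.List.mem_pyRange_one] at hi
  refine PySem.List.foldl_congr_mem _ _ _ _ (fun a j hj => ?_)
  rw [PySem.List.mem_pyRange_one] at hj
  rw [htbl' i j (by omega) (by omega) (by omega)]
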